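-- pv_equiv track=rewrite | github.com/prajjwal-17/Graphical-DBMS | backend/TCS.py | group_name_roles
-- ===== SOURCE A (Python) =====
-- def group_name_roles(flat_list):
--     grouped = []
--     i = 0
--     while i < len(flat_list):
--         name = flat_list[i]
--         role = None
--         if i + 1 < len(flat_list) and flat_list[i + 1].startswith("("):
--             role = flat_list[i + 1].strip("()")
--             i += 2
--         else:
--             i += 1
--         grouped.append({
--             "name": name,
--             "role": role if role else "Unknown"
--         })
--     return grouped
-- ===== SOURCE B (Python) =====
-- def group_name_roles(flat_list):
--     grouped = []
--     expecting_role = False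
--     for token in flat_list:
--         if expecting_role and token.startswith("("):
--             role = token.strip("()")
--             grouped[-1]["role"] = role if role else "Unknown"
--             expecting_role = False
--         else:
--             grouped.append({"name": token, "role": "Unknown"})
--             expecting_role = True
--     return grouped
-- ===== Notes on version B (the rewrite author's own statement) =====
-- stated objective: alternative
-- what changed: Replaced the index-based while loop with look-ahead at flat_list[i+1] by a single stateful forward pass that appends a default group per token and fills in the previous group's role on a look-back when a '('-token follows a name.
import Mathlib
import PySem

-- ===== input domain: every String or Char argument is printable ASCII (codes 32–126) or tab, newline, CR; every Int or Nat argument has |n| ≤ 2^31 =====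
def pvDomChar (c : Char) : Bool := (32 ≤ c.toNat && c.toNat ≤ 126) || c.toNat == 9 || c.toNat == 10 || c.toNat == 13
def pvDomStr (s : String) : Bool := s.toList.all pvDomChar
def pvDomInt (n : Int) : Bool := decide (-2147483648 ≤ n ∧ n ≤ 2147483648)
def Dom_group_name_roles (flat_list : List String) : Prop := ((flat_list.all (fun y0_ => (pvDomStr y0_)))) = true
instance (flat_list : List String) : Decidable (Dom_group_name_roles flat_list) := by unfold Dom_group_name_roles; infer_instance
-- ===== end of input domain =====

-- B replaces A's index-based look-ahead pairing by a single stateful look-back pass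
-- (append a group per token, or fill in the previous group's role); objective: alternative decomposition, same cost.

-- ===== PORT A =====
-- A's while-loop over the index i; each iteration consumes one or two tokens.
def groupALoop (flat_list : List String) (i : Nat) : List (List (String × String)) :=
  if h : i < flat_list.length then
    let name := flat_list[i]
    if h2 : i + 1 < flat_list.length then
      if PySem.Str.startswith flat_list[i + 1] "(" then
        let role := PySem.Str.stripChars flat_list[i + 1] "()"
        [("name", name), ("role", if role = "" then "Unknown" else role)] :: groupALoop flat_list (i + 2)
      else
        [("name", name), ("role", "Unknown")] :: groupALoop flat_list (i + 1)
    else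
      [("name", name), ("role", "Unknown")] :: groupALoop flat_list (i + 1)
  else []
termination_by flat_list.length - i

def group_name_roles (flat_list : List String) : List (List (String × String)) :=
  groupALoop flat_list 0

-- ===== PORT B =====
-- grouped[-1]["role"] = r : overwrite the "role" entry of the last group, in place.
def pvRoleSet (g : List (String × String)) (r : String) : List (String × String) :=
  g.map (fun kv => if kv.1 = "role" then (kv.1, r) else kv)

def pvUpdateLast : List (List (String × String)) → String → List (List (String × String))
  | [], _ => []
  | [g], r => [pvRoleSet g r]
  | g :: gs, r => g :: pvUpdateLast gs r

-- one step of B's for-loop; state = (grouped, expecting_role)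
def pvStepB (st : List (List (String × String)) × Bool) (token : String) :
    List (List (String × String)) × Bool :=
  if st.2 && PySem.Str.startswith token "(" then
    let role := PySem.Str.stripChars token "()"
    (pvUpdateLast st.1 (if role = "" then "Unknown" else role), false)
  else
    (st.1 ++ [[("name", token), ("role", "Unknown")]], true)

def group_name_roles_alt (flat_list : List String) : List (List (String × String)) :=
  (flat_list.foldl pvStepB ([], false)).1

-- ===== PRECONDITION & SPEC =====
def Spec_group_name_roles (flat_list : List String) (out : List (List (String × String))) : Prop := out = group_name_roles_alt flat_list
instance (flat_list : List String) (out : List (List (String × String))) : Decidable (Spec_group_name_roles flat_list out) := by unfold Spec_group_name_roles; infer_instance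

-- ===== CLAIM (what is proved, stated in full; the proofs are below) =====
def Claim_equal_group_name_roles : Prop := ∀ (flat_list : List String), Dom_group_name_roles flat_list → Spec_group_name_roles flat_list (group_name_roles flat_list)

-- ===== LEMMAS AND PROOFS =====

-- the common pairing function both ports compute
def pvPair : List String → List (List (String × String))
  | [] => []
  | [x] => [[("name", x), ("role", "Unknown")]]
  | x :: y :: ys =>
    if PySem.Str.startswith y "(" then
      let role := PySem.Str.stripChars y "()"
      [("name", x), ("role", if role = "" then "Unknown" else role)] :: pvPair ys
    else
      [("name", x), ("role", "Unknown")] :: pvPair (y :: ys)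

theorem groupALoop_eq_pvPair (flat_list : List String) (i : Nat) :
    groupALoop flat_list i = pvPair (flat_list.drop i) := by
  induction hn : flat_list.length - i using Nat.strong_induction_on generalizing i with
  | _ n ih =>
    subst hn
    rw [groupALoop]
    by_cases h : i < flat_list.length
    · by_cases h2 : i + 1 < flat_list.length
      · have e1 := ih (flat_list.length - (i + 2)) (by omega) (i + 2) rfl
        have e2 := ih (flat_list.length - (i + 1)) (by omega) (i + 1) rfl
        rw [List.drop_eq_getElem_cons h2] at e2
        rw [List.drop_eq_getElem_cons h, List.drop_eq_getElem_cons h2]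
        simp only [h, h2, dif_pos, pvPair]
        rw [e1, e2]
      · have e2 := ih (flat_list.length - (i + 1)) (by omega) (i + 1) rfl
        have hd : flat_list.drop (i + 1) = [] := List.drop_eq_nil_of_le (by omega)
        rw [hd] at e2
        rw [List.drop_eq_getElem_cons h, hd]
        simp only [h, h2, dif_pos, dif_neg, not_false_iff, pvPair]
        rw [e2]
        simp [pvPair]
    · have hd : flat_list.drop i = [] := List.drop_eq_nil_of_le (by omega)
      simp [h, hd, pvPair]

theorem pvUpdateLast_append (acc : List (List (String × String)))
    (g : List (String × String)) (r : String) :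
    pvUpdateLast (acc ++ [g]) r = acc ++ [pvRoleSet g r] := by
  induction acc with
  | nil => rfl
  | cons a as ih =>
    cases as with
    | nil => rfl
    | cons b bs => simpa [pvUpdateLast] using ih

theorem pvRoleSet_mkU (x r : String) :
    pvRoleSet [("name", x), ("role", "Unknown")] r = [("name", x), ("role", r)] := by
  simp [pvRoleSet]

theorem foldl_pvStepB_pvPair (l : List String) :
    (∀ acc, (l.foldl pvStepB (acc, false)).1 = acc ++ pvPair l) ∧
    (∀ acc x, (l.foldl pvStepB (acc ++ [[("name", x), ("role", "Unknown")]], true)).1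
        = acc ++ pvPair (x :: l)) := by
  induction l with
  | nil => simp [pvPair]
  | cons y ys ih =>
    constructor
    · intro acc
      have := ih.2 acc y
      simpa [List.foldl_cons, pvStepB] using this
    · intro acc x
      by_cases hs : PySem.Str.startswith y "(" = true
      · have hs' : PySem.Chars.startswith y.toList ['('] = true := by simpa using hs
        have hstep : pvStepB (acc ++ [[("name", x), ("role", "Unknown")]], true) y
            = (acc ++ [[("name", x),
                ("role", if PySem.Str.stripChars y "()" = "" then "Unknown"
                         else PySem.Str.stripChars y "()")]], false) := by
          simp only [pvStepB]
          rw [if_pos (by simp [hs'])]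
          simp [pvUpdateLast_append, pvRoleSet_mkU]
        rw [List.foldl_cons, hstep, ih.1]
        simp [pvPair, hs']
      · simp only [Bool.not_eq_true] at hs
        have hs' : PySem.Chars.startswith y.toList ['('] = false := by simpa using hs
        have hstep : pvStepB (acc ++ [[("name", x), ("role", "Unknown")]], true) y
            = (acc ++ [[("name", x), ("role", "Unknown")]]
                ++ [[("name", y), ("role", "Unknown")]], true) := by
          simp only [pvStepB]
          rw [if_neg (by simp [hs'])]
        have h2 := ih.2 (acc ++ [[("name", x), ("role", "Unknown")]]) y
        rw [List.foldl_cons, hstep, h2]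
        simp [pvPair, hs']

-- ===== VERDICT (by name: the statement is the Claim_ definition above) =====
theorem group_name_roles_spec : Claim_equal_group_name_roles := by
  intro flat_list _
  unfold Spec_group_name_roles group_name_roles group_name_roles_alt
  rw [groupALoop_eq_pvPair flat_list 0]
  simpa using ((foldl_pvStepB_pvPair flat_list).1 []).symm
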